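-- pv_equiv track=rewrite | github.com/bbln111/SchedulingAlgo | monday_api.py | _get_days
-- ===== SOURCE A (Python) =====
-- def _get_days(big_dict: dict):
--     days = []
--     day_counter = None
--     for key in big_dict.keys():
--         if key == "date__1":
--             day_counter = 0
--
--         if day_counter is None:
--             continue
--         if day_counter == 0:
--             day_counter += 1
--             continue
--
--         if day_counter > 6:
--             continue
--         days.append(big_dict[key])
--
--     return days
-- ===== SOURCE B (Python) =====
-- def _get_days(big_dict: dict):
--     keys = list(big_dict)
--     if "date__1" not in keys:
--         return []
--     start = keys.index("date__1") + 1
--     return [big_dict[k] for k in keys[start:]]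
-- ===== Notes on version B (the rewrite author's own statement) =====
-- stated objective: simpler
-- what changed: Replaces A's stateful flag/counter single pass (with a dead day_counter > 6 branch) by locating the sentinel key's index and mapping the suffix of keys to their values.
import Mathlib
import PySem

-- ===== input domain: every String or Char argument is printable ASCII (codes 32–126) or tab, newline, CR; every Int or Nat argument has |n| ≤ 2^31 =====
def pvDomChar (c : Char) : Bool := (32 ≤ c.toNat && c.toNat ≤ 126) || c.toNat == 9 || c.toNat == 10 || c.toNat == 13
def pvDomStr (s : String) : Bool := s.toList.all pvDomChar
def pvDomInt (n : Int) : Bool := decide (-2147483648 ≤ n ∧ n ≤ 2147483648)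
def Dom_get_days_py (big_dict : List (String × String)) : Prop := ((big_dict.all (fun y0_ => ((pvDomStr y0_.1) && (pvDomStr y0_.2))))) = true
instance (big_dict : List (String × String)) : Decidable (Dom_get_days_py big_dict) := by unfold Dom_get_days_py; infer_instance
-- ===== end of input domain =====

-- B replaces A's stateful flag/counter pass by locating the sentinel key and mapping the suffix of keys (simpler decomposition).

-- ===== PORT A =====
-- one loop step of A: state = (days, day_counter)
def getDaysStep (d : PySem.Dict String String) (s : List String × Option Int) (key : String) :
    List String × Option Int :=
  let c := if key == "date__1" then some (0 : Int) else s.2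
  match c with
  | none => (s.1, none)
  | some n =>
    if n == 0 then (s.1, some (n + 1))
    else if n > 6 then (s.1, some n)
    else (s.1 ++ [d.getD key ""], some n)   -- big_dict[key]: key comes from d.keys, so present; getD is exact here

def get_days_py (big_dict : List (String × String)) : List String :=
  let d := PySem.Dict.ofList big_dict
  (d.keys.foldl (getDaysStep d) ([], none)).1

-- ===== PORT B =====
def get_days_py_alt (big_dict : List (String × String)) : List String :=
  let d := PySem.Dict.ofList big_dict
  let keys := d.keys
  match PySem.List.index? keys "date__1" with
  | none => []
  | some i => (keys.drop (i + 1)).map (fun k => d.getD k "")  -- keys[i+1:] with 0 ≤ i+1: slice = drop, exact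

-- ===== PRECONDITION & SPEC =====
def Spec_get_days_py (big_dict : List (String × String)) (out : List String) : Prop := out = get_days_py_alt big_dict
instance (big_dict : List (String × String)) (out : List String) : Decidable (Spec_get_days_py big_dict out) := by unfold Spec_get_days_py; infer_instance

-- ===== CLAIM (what is proved, stated in full; the proofs are below) =====
def Claim_equal_get_days_py : Prop := ∀ (big_dict : List (String × String)), Dom_get_days_py big_dict → Spec_get_days_py big_dict (get_days_py big_dict)

-- ===== LEMMAS AND PROOFS =====

-- before the sentinel: the state stays (acc, none)
theorem foldl_step_none (d : PySem.Dict String String) (ks : List String) (acc : List String)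
    (h : "date__1" ∉ ks) :
    ks.foldl (getDaysStep d) (acc, none) = (acc, none) := by
  induction ks with
  | nil => rfl
  | cons k ks ih =>
    simp only [List.mem_cons, not_or] at h
    have hk : (k == "date__1") = false := by simpa using Ne.symm h.1
    simp only [List.foldl_cons, getDaysStep, hk]
    exact ih h.2

-- after the sentinel was passed (counter = 1): every remaining value is appended
theorem foldl_step_one (d : PySem.Dict String String) (ks : List String) (acc : List String)
    (h : "date__1" ∉ ks) :
    (ks.foldl (getDaysStep d) (acc, some 1)).1 = acc ++ ks.map (fun k => d.getD k "") := by
  induction ks generalizing acc with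
  | nil => simp
  | cons k ks ih =>
    simp only [List.mem_cons, not_or] at h
    have hk : (k == "date__1") = false := by simpa using Ne.symm h.1
    simp only [List.foldl_cons, getDaysStep, hk]
    norm_num
    rw [ih _ h.2]
    simp

theorem get_days_py_spec : Claim_equal_get_days_py := by
  unfold Claim_equal_get_days_py
  intro big_dict _
  unfold Spec_get_days_py get_days_py get_days_py_alt
  set d := PySem.Dict.ofList big_dict with hd
  have hnd : d.keys.Nodup := PySem.Dict.nodup_keys_ofList big_dict
  cases hidx : PySem.List.index? d.keys "date__1" with
  | none =>
    have hmem : "date__1" ∉ d.keys := (PySem.List.index?_eq_none_iff _ _).1 hidx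
    simp only [hidx, foldl_step_none d d.keys [] hmem]
  | some i =>
    obtain ⟨pre, suf, hks, hlen, hpre⟩ := (PySem.List.index?_eq_some_iff _ _ _).1 hidx
    have hsuf : "date__1" ∉ suf := by
      rw [hks] at hnd
      have := (List.nodup_append.1 hnd).2.1
      exact (List.nodup_cons.1 this).1
    simp only [hks]
    have h1 : pre.foldl (getDaysStep d) ([], none) = ([], none) :=
      foldl_step_none d pre [] hpre
    rw [List.foldl_append, h1, List.foldl_cons]
    have hstep : getDaysStep d ([], none) "date__1" = ([], some 1) := by
      simp [getDaysStep]
    rw [hstep, foldl_step_one d suf [] hsuf]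
    have hdrop : (pre ++ "date__1" :: suf).drop (i + 1) = suf := by
      have : pre ++ "date__1" :: suf = (pre ++ ["date__1"]) ++ suf := by simp
      rw [this, ← hlen]
      have : pre.length + 1 = (pre ++ ["date__1"]).length := by simp
      rw [this, List.drop_left]
    rw [← hks]
    simp only [hidx]
    rw [hks, hdrop]
    simp
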